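-- pv_equiv track=rewrite | github.com/Anaphory/grambank | grambank/scripts/stats_util.py | levpairs
-- ===== SOURCE A (Python) =====
-- def pairs(xs):
--     return [(x, y) for x in xs for y in xs if x < y]
--
-- def levpairs(pths):
--     def lev(p1, p2):
--         r = {node: i for (i, node) in enumerate(reversed(p1))}
--         for (i, node) in enumerate(reversed(p2)):
--             if node in r:
--                 return max(i, r[node])
--         return None
--     lgp = {p[-1]: p[:-1] for p in pths}
--     return {(l1, l2): lev(lgp[l1], lgp[l2]) for (l1, l2) in pairs(list(lgp.keys()))}
-- ===== SOURCE B (Python) =====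
-- def levpairs(pths):
--     # Node-centric sweep with a global inverted index instead of per-pair scans:
--     # occ maps each ancestor node to the leaves whose path contains it (with the
--     # node's root-most distance from the leaf); each path is then swept once from
--     # the leaf towards the root, answering every pair (l1, l2) at the first swept
--     # node shared with l1's path; finally the answers are emitted in pair order.
--     lgp = {p[-1]: p[:-1] for p in pths}
--     leaves = list(lgp)
--     occ = {}
--     for l in leaves:
--         p = lgp[l]
--         seen = {}
--         for i, node in enumerate(p):
--             seen.setdefault(node, len(p) - 1 - i)
--         for node, k in seen.items():
--             occ[node] = occ.get(node, []) + [(l, k)]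
--     ans = {}
--     for l2 in leaves:
--         p2 = lgp[l2]
--         done = set()
--         for i, node in enumerate(reversed(p2)):
--             for (l1, k) in occ.get(node, []):
--                 if l1 < l2 and l1 not in done:
--                     done.add(l1)
--                     ans[(l1, l2)] = max(i, k)
--     return {(l1, l2): ans.get((l1, l2))
--             for l1 in leaves for l2 in leaves if l1 < l2}
-- ===== Notes on version B (the rewrite author's own statement) =====
-- stated objective: alternative
-- what changed: B replaces A's per-pair dict construction and reversed-scan-with-early-return by a node-centric sweep: it builds one global inverted index node->[(leaf, root-most depth-from-leaf)] in a single pass, then sweeps each path once from leaf to root answering all pairs with that path as the larger leaf via a done-set, and finally emits the collected answers in pair order.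
import Mathlib
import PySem

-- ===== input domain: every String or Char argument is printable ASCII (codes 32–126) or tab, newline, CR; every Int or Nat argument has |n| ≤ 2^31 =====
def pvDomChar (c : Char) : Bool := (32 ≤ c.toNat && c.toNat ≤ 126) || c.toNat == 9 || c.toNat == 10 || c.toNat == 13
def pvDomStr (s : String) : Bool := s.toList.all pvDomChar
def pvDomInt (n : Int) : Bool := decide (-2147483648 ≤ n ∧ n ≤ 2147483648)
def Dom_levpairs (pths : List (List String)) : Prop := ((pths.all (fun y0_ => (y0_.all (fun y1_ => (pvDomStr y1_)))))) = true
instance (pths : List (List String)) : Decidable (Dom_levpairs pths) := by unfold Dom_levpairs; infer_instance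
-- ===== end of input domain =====

-- B replaces A's per-pair dict-and-scan by a node-centric sweep: one global inverted
-- index node -> [(leaf, root-most depth)] built in a single pass, then each path is
-- swept once leaf-to-root answering all pairs having it as the larger leaf via a
-- done-set; answers are emitted in pair order (objective: alternative; same value).

-- ===== PORT A =====
-- pairs(xs) = [(x, y) for x in xs for y in xs if x < y]
def pvPairsA (xs : List String) : List (String × String) :=
  xs.flatMap (fun x => (xs.filter (fun y => decide (x < y))).map (fun y => (x, y)))

-- the for-loop of lev with its early return
def pvLevScanA (r : PySem.Dict String Int) : List (Int × String) → Option Int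
  | [] => none
  | (i, node) :: rest =>
    match r.get? node with
    | some v => some (max i v)
    | none => pvLevScanA r rest

def pvLevA (p1 p2 : List String) : Option Int :=
  pvLevScanA
    ((PySem.List.enumerate p1.reverse).foldl (fun d q => d.insert q.2 q.1) PySem.Dict.empty)
    (PySem.List.enumerate p2.reverse)

-- p[-1] is ported with pyGet?; on an empty path Python raises IndexError (excluded by Pre_),
-- the port takes the default "".
def levpairs (pths : List (List String)) : List (String × String × Option Int) :=
  let lgp : PySem.Dict String (List String) :=
    pths.foldl
      (fun d p => d.insert ((PySem.List.pyGet? p (-1)).getD "") (PySem.List.slice p none (some (-1))))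
      PySem.Dict.empty
  (pvPairsA lgp.keys).map (fun q => (q.1, q.2, pvLevA (lgp.getD q.1 []) (lgp.getD q.2 [])))

-- ===== PORT B =====
-- seen: node -> root-most distance from the leaf end, first forward occurrence wins
def pvSeenB (p : List String) : PySem.Dict String Int :=
  (PySem.List.enumerate p).foldl
    (fun d q => d.setdefault q.2 ((p.length : Int) - 1 - q.1)) PySem.Dict.empty

-- occ: inverted index node -> [(leaf, root-most depth)] over all leaves
def pvOccB (lgp : PySem.Dict String (List String)) : PySem.Dict String (List (String × Int)) :=
  lgp.keys.foldl
    (fun occ l =>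
      (pvSeenB (lgp.getD l [])).items.foldl
        (fun occ e => occ.insert e.1 (occ.getD e.1 [] ++ [(l, e.2)])) occ)
    PySem.Dict.empty

-- one leaf-to-root sweep of p2, answering pairs (l1, l2) at the first shared node
def pvSweepB (occ : PySem.Dict String (List (String × Int))) (l2 : String) (p2 : List String)
    (ans : PySem.Dict (String × String) Int) : PySem.Dict (String × String) Int :=
  ((PySem.List.enumerate p2.reverse).foldl
    (fun st q =>
      (occ.getD q.2 []).foldl
        (fun st e =>
          if e.1 < l2 ∧ PySem.Set.contains st.1 e.1 = false then
            (PySem.Set.add st.1 e.1, st.2.insert (e.1, l2) (max q.1 e.2))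
          else st)
        st)
    ((PySem.Set.empty : PySem.Set String), ans)).2

def levpairs_alt (pths : List (List String)) : List (String × String × Option Int) :=
  let lgp : PySem.Dict String (List String) :=
    pths.foldl
      (fun d p => d.insert ((PySem.List.pyGet? p (-1)).getD "") (PySem.List.slice p none (some (-1))))
      PySem.Dict.empty
  let occ := pvOccB lgp
  let ans := lgp.keys.foldl (fun ans l2 => pvSweepB occ l2 (lgp.getD l2 []) ans) PySem.Dict.empty
  lgp.keys.flatMap (fun l1 =>
    lgp.keys.filterMap (fun l2 =>
      if l1 < l2 then some (l1, l2, ans.get? (l1, l2)) else none))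

-- ===== PRECONDITION & SPEC =====
-- Pre_ excludes exactly the inputs on which Python A raises: an empty path makes p[-1] an IndexError.
def Pre_levpairs (pths : List (List String)) : Prop := ∀ p ∈ pths, p ≠ []
instance (pths : List (List String)) : Decidable (Pre_levpairs pths) := by unfold Pre_levpairs; infer_instance

def pvWitness_levpairs : List (List String) := [["r", "a", "x"], ["r", "b", "y"], ["r", "a", "z"]]

def Spec_levpairs (pths : List (List String)) (out : List (String × String × Option Int)) : Prop := out = levpairs_alt pths
instance (pths : List (List String)) (out : List (String × String × Option Int)) : Decidable (Spec_levpairs pths out) := by unfold Spec_levpairs; infer_instance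

-- ===== CLAIM (what is proved, stated in full; the proofs are below) =====
def Claim_equal_levpairs : Prop := ∀ (pths : List (List String)), Dom_levpairs pths → Pre_levpairs pths → Spec_levpairs pths (levpairs pths)

-- ===== LEMMAS AND PROOFS =====

-- A's per-pair dict r, described by find? on enumerate
lemma pv_foldl_insert_get? (l : List (Int × String)) (d : PySem.Dict String Int) (k : String) :
    (l.foldl (fun d q => d.insert q.2 q.1) d).get? k =
      match l.reverse.find? (fun q => q.2 == k) with
      | some q => some q.1
      | none => d.get? k := by
  induction l generalizing d with
  | nil => simp
  | cons a t ih =>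
      simp only [List.foldl_cons, ih, List.reverse_cons, List.find?_append]
      rcases h : t.reverse.find? (fun q => q.2 == k) with _ | q
      · by_cases hk : a.2 = k
        · simp [h, List.find?, hk, Option.or, PySem.Dict.get?_insert_self]
        · have hb : (a.2 == k) = false := beq_eq_false_iff_ne.mpr hk
          simp [h, List.find?, hb, Option.or, PySem.Dict.get?_insert_of_ne _ _ (Ne.symm hk)]
      · simp [h, Option.or]

-- B's seen-dict loop (setdefault with an arbitrary stored value)
lemma pv_foldl_setdefault_get? (f : Int × String → Int) (l : List (Int × String))
    (d : PySem.Dict String Int) (k : String) :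
    (l.foldl (fun d q => d.setdefault q.2 (f q)) d).get? k =
      match d.get? k with
      | some v => some v
      | none => (l.find? (fun q => q.2 == k)).map f := by
  induction l generalizing d with
  | nil => rcases h : d.get? k with _ | v <;> simp [h]
  | cons a t ih =>
      simp only [List.foldl_cons, ih]
      by_cases hc : d.contains a.2 = true
      · rw [PySem.Dict.setdefault_of_contains _ _ hc]
        by_cases hk : a.2 = k
        · subst hk
          rcases hg : d.get? a.2 with _ | v
          · rw [PySem.Dict.contains_eq_isSome_get?, hg] at hc; simp at hc
          · simp
        · have hb : (a.2 == k) = false := beq_eq_false_iff_ne.mpr hk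
          simp [List.find?, hb]
      · have hc' : d.contains a.2 = false := by simpa using hc
        rw [PySem.Dict.setdefault_of_not_contains _ _ hc']
        by_cases hk : a.2 = k
        · subst hk
          have hg : d.get? a.2 = none := by
            rw [PySem.Dict.contains_eq_isSome_get?] at hc'
            exact Option.not_isSome_iff_eq_none.mp (by simp [hc'])
          simp [hg, List.find?, PySem.Dict.get?_insert_self]
        · have hb : (a.2 == k) = false := beq_eq_false_iff_ne.mpr hk
          simp [List.find?, hb, PySem.Dict.get?_insert_of_ne _ _ (Ne.symm hk)]

lemma pv_scanA_eq_find? (r : PySem.Dict String Int) (l : List (Int × String)) :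
    pvLevScanA r l =
      (l.find? (fun q => (r.get? q.2).isSome)).map (fun q => max q.1 ((r.get? q.2).getD 0)) := by
  induction l with
  | nil => simp [pvLevScanA]
  | cons a t ih =>
      rcases h : r.get? a.2 with _ | v
      · simp [pvLevScanA, h, ih, List.find?]
      · simp [pvLevScanA, h, List.find?]

lemma pv_enumerate_shift {α : Type} (xs : List α) (s : Int) :
    PySem.List.enumerate xs (s + 1) = (PySem.List.enumerate xs s).map (fun q => (q.1 + 1, q.2)) := by
  induction xs generalizing s with
  | nil => simp [PySem.List.enumerate]
  | cons a t ih => simp [PySem.List.enumerate_cons, ih]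

lemma pv_enumerate_reverse {α : Type} (xs : List α) :
    PySem.List.enumerate xs.reverse =
      ((PySem.List.enumerate xs).map (fun q => ((xs.length : Int) - 1 - q.1, q.2))).reverse := by
  induction xs with
  | nil => simp [PySem.List.enumerate]
  | cons a t ih =>
      rw [List.reverse_cons, PySem.List.enumerate_append, ih]
      have hsh := pv_enumerate_shift (α := α) t 0
      norm_num at hsh
      simp only [PySem.List.enumerate_cons, List.map_cons, List.reverse_cons]
      norm_num [hsh, List.map_map, PySem.List.enumerate]
      intro i b _
      ring

lemma pv_filterMap_if (x : String) (xs : List String) (g : String → String → Option Int) :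
    xs.filterMap (fun y => if x < y then some (x, y, g x y) else none) =
      (xs.filter (fun y => decide (x < y))).map (fun y => (x, y, g x y)) := by
  induction xs with
  | nil => rfl
  | cons a t ih =>
      rw [List.filterMap_cons, List.filter_cons]
      by_cases h : x < a
      · rw [if_pos h, if_pos (by simpa using h), List.map_cons, ih]
      · rw [if_neg h, if_neg (by simpa using h), ih]

-- A's comprehension over pairs(keys), reshaped as a fused double loop
lemma pv_pairs_map (xs : List String) (g : String → String → Option Int) :
    (pvPairsA xs).map (fun q => (q.1, q.2, g q.1 q.2)) =
      xs.flatMap (fun x => xs.filterMap (fun y => if x < y then some (x, y, g x y) else none)) := by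
  unfold pvPairsA
  rw [List.map_flatMap]
  refine List.flatMap_congr (fun x _ => ?_)
  rw [pv_filterMap_if x xs g, List.map_map]
  rfl

-- A's per-pair dict r(p1): lookup = distance from the leaf of the root-most occurrence in p1
lemma pv_rA_get? (p1 : List String) (k : String) :
    ((PySem.List.enumerate p1.reverse).foldl (fun d q => d.insert q.2 q.1) PySem.Dict.empty).get? k =
      ((PySem.List.enumerate p1).find? (fun q => q.2 == k)).map
        (fun q => (p1.length : Int) - 1 - q.1) := by
  rw [pv_foldl_insert_get?, pv_enumerate_reverse, List.reverse_reverse, List.find?_map]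
  rcases h : (PySem.List.enumerate p1).find? (fun q => q.2 == k) with _ | q
  · have h' : (PySem.List.enumerate p1).find?
        ((fun q : Int × String => q.2 == k) ∘ fun q => ((p1.length : Int) - 1 - q.1, q.2)) = none := h
    simp only [h', Option.map_none]
    simp only [h, Option.map_none]
    simp [PySem.Dict.get?_empty]
  · have h' : (PySem.List.enumerate p1).find?
        ((fun q : Int × String => q.2 == k) ∘ fun q => ((p1.length : Int) - 1 - q.1, q.2)) = some q
      := h
    simp only [h, h', Option.map_some]

-- B's seen dict computes exactly A's r, pointwise
lemma pv_seen_get? (p : List String) (k : String) :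
    (pvSeenB p).get? k =
      ((PySem.List.enumerate p).find? (fun q => q.2 == k)).map
        (fun q => (p.length : Int) - 1 - q.1) := by
  rw [pvSeenB, pv_foldl_setdefault_get?]
  simp

-- keys of the seen dicts stay distinct through the setdefault loop
lemma pv_nodup_keys_setdefault (f : Int × String → Int) (l : List (Int × String))
    (d : PySem.Dict String Int) (h : d.keys.Nodup) :
    (l.foldl (fun d q => d.setdefault q.2 (f q)) d).keys.Nodup := by
  induction l generalizing d with
  | nil => exact h
  | cons a t ih =>
      simp only [List.foldl_cons]
      apply ih
      by_cases hc : d.contains a.2 = true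
      · rw [PySem.Dict.setdefault_of_contains _ _ hc]; exact h
      · have hc' : d.contains a.2 = false := by simpa using hc
        rw [PySem.Dict.setdefault_of_not_contains _ _ hc',
          PySem.Dict.keys_insert_of_not_contains _ _ hc']
        have hnm : a.2 ∉ d.keys := by
          intro hm
          exact absurd ((PySem.Dict.contains_iff_mem_keys d a.2).mpr hm) (by simp [hc'])
        simp [List.nodup_append, h]
        intro b hb hcon
        exact hnm (hcon ▸ hb)

-- occ inner loop: appending one leaf's items
lemma pv_inner_occ (l : String) (its : List (String × Int))
    (occ : PySem.Dict String (List (String × Int))) (node : String) :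
    (its.foldl (fun occ e => occ.insert e.1 (occ.getD e.1 [] ++ [(l, e.2)])) occ).getD node [] =
      occ.getD node [] ++ (its.filter (fun e => e.1 == node)).map (fun e => (l, e.2)) := by
  induction its generalizing occ with
  | nil => simp
  | cons a t ih =>
      simp only [List.foldl_cons, ih, List.filter_cons]
      by_cases hk : a.1 = node
      · subst hk
        simp [PySem.Dict.getD_insert_self]
      · have hb : (a.1 == node) = false := beq_eq_false_iff_ne.mpr hk
        rw [PySem.Dict.getD_insert_of_ne _ _ _ (Ne.symm hk)]
        simp [hb]

-- occ as a whole: concatenation of per-leaf blocks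
lemma pv_occ_getD (g : String → PySem.Dict String Int) (ls : List String)
    (occ0 : PySem.Dict String (List (String × Int))) (node : String) :
    (ls.foldl
        (fun occ l => (g l).items.foldl
          (fun occ e => occ.insert e.1 (occ.getD e.1 [] ++ [(l, e.2)])) occ)
        occ0).getD node [] =
      occ0.getD node [] ++
        ls.flatMap (fun l => ((g l).items.filter (fun e => e.1 == node)).map (fun e => (l, e.2))) := by
  induction ls generalizing occ0 with
  | nil => simp
  | cons l t ih =>
      simp only [List.foldl_cons, List.flatMap_cons, ih, pv_inner_occ, List.append_assoc]

-- in a list of pairs with distinct first components, filtering on a present key yields that single pair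
lemma pv_filter_unique (its : List (String × Int)) (node : String) (k : Int)
    (hnd : (its.map Prod.fst).Nodup) (hm : (node, k) ∈ its) :
    its.filter (fun e => e.1 == node) = [(node, k)] := by
  induction its with
  | nil => simp at hm
  | cons a t ih =>
      simp only [List.map_cons, List.nodup_cons] at hnd
      rcases List.mem_cons.mp hm with h | h
      · subst h
        simp only [List.filter_cons, beq_self_eq_true, if_pos]
        have : t.filter (fun e => e.1 == node) = [] := by
          apply List.filter_eq_nil_iff.mpr
          intro e he
          have : e.1 ∈ t.map Prod.fst := List.mem_map.mpr ⟨e, he, rfl⟩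
          simp only [beq_iff_eq]
          intro hcon
          exact hnd.1 (hcon ▸ this)
        simp [this]
      · have hne : a.1 ≠ node := by
          intro hcon
          have : node ∈ t.map Prod.fst := List.mem_map.mpr ⟨(node, k), h, rfl⟩
          exact hnd.1 (hcon ▸ this)
        simp only [List.filter_cons, beq_eq_false_iff_ne.mpr hne, Bool.false_eq_true, if_neg,
          not_false_iff]
        exact ih hnd.2 h

-- one leaf's block of occ, described by the seen dict's lookup
lemma pv_block_eq (d : PySem.Dict String Int) (hnd : d.keys.Nodup) (node : String) :
    d.items.filter (fun e => e.1 == node) =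
      match d.get? node with
      | some k => [(node, k)]
      | none => [] := by
  rcases h : d.get? node with _ | k
  · apply List.filter_eq_nil_iff.mpr
    intro e he
    have hmk : e.1 ∈ d.keys := PySem.Dict.mem_keys_of_mem_items d he
    have hnm : node ∉ d.keys := (PySem.Dict.get?_eq_none_iff_not_mem_keys d node).mp h
    simp only [beq_iff_eq]
    intro hcon
    exact hnm (hcon ▸ hmk)
  · exact pv_filter_unique d.items node k (by simpa [PySem.Dict.keys] using hnd)
      (PySem.Dict.mem_items_of_get?_eq_some d h)

-- find? over concatenated blocks whose elements carry their leaf as first component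
lemma pv_find_blocks_none (B : String → List (String × Int)) (x : String)
    (hB : ∀ l e, e ∈ B l → e.1 = l) (ls : List String) (hx : x ∉ ls) :
    (ls.flatMap B).find? (fun e => e.1 == x) = none := by
  induction ls with
  | nil => simp
  | cons l t ih =>
      simp only [List.flatMap_cons, List.find?_append]
      have h1 : (B l).find? (fun e => e.1 == x) = none := by
        apply List.find?_eq_none.mpr
        intro e he
        have := hB l e he
        simp only [beq_iff_eq, this]
        intro hcon
        exact hx (hcon ▸ List.mem_cons_self)
      rw [h1]
      simpa using ih (fun hm => hx (List.mem_cons_of_mem _ hm))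

lemma pv_find_blocks (B : String → List (String × Int)) (x : String)
    (hB : ∀ l e, e ∈ B l → e.1 = l) (ls : List String) (hnd : ls.Nodup) (hx : x ∈ ls) :
    (ls.flatMap B).find? (fun e => e.1 == x) = (B x).find? (fun e => e.1 == x) := by
  induction ls with
  | nil => simp at hx
  | cons l t ih =>
      simp only [List.nodup_cons] at hnd
      simp only [List.flatMap_cons, List.find?_append]
      by_cases hl : l = x
      · subst hl
        rcases h : (B l).find? (fun e => e.1 == l) with _ | e
        · rw [h, pv_find_blocks_none B l hB t hnd.1]
          rfl
        · rw [h]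
          rfl
      · have h1 : (B l).find? (fun e => e.1 == x) = none := by
          apply List.find?_eq_none.mpr
          intro e he
          simp only [beq_iff_eq, hB l e he]
          exact hl
        rw [h1, Option.none_or]
        have hx' : x ∈ t := by
          rcases List.mem_cons.mp hx with h | h
          · exact absurd h.symm hl
          · exact h
        exact ih hnd.2 hx'

-- the inner sweep loop, projected to one pair (x, l2)
lemma pv_inner_sweep (l2 x : String) (qi : Int) (es : List (String × Int))
    (done : PySem.Set String) (ans : PySem.Dict (String × String) Int) :
    (PySem.Set.contains
        (es.foldl (fun st e =>
          if e.1 < l2 ∧ PySem.Set.contains st.1 e.1 = false then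
            (PySem.Set.add st.1 e.1, st.2.insert (e.1, l2) (max qi e.2))
          else st) (done, ans)).1 x =
      (PySem.Set.contains done x ||
        ((es.find? (fun e => e.1 == x)).isSome && decide (x < l2)))) ∧
    ((es.foldl (fun st e =>
          if e.1 < l2 ∧ PySem.Set.contains st.1 e.1 = false then
            (PySem.Set.add st.1 e.1, st.2.insert (e.1, l2) (max qi e.2))
          else st) (done, ans)).2.get? (x, l2) =
      if PySem.Set.contains done x = false ∧ x < l2 then
        match es.find? (fun e => e.1 == x) with
        | some e => some (max qi e.2)
        | none => ans.get? (x, l2)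
      else ans.get? (x, l2)) := by
  induction es generalizing done ans with
  | nil =>
      constructor
      · simp
      · by_cases h : PySem.Set.contains done x = false ∧ x < l2 <;> simp [h]
  | cons a t ih =>
      simp only [List.foldl_cons]
      by_cases hax : a.1 = x
      · have hfind : ((a :: t).find? (fun e => e.1 == x)) = some a :=
          List.find?_cons_of_pos (by simp [hax])
        rw [hfind]
        by_cases hlt : a.1 < l2
        · have hxlt : x < l2 := by rw [← hax]; exact hlt
          by_cases hdc : PySem.Set.contains done x = false
          · have hdca : PySem.Set.contains done a.1 = false := by rw [hax]; exact hdc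
            rw [if_pos ⟨hlt, hdca⟩]
            obtain ⟨ih1, ih2⟩ := ih (PySem.Set.add done a.1) (ans.insert (a.1, l2) (max qi a.2))
            have hcadd : PySem.Set.contains (PySem.Set.add done a.1) x = true :=
              (PySem.Set.contains_iff _ _).mpr ((PySem.Set.mem_add _ _ _).mpr (Or.inr hax.symm))
            have hdec : decide (x < l2) = true := decide_eq_true hxlt
            constructor
            · rw [ih1, hcadd, hdec]
              simp
            · rw [ih2, if_neg (fun hc => Bool.noConfusion (hcadd ▸ hc.1))]
              have hg : (ans.insert (a.1, l2) (max qi a.2)).get? (x, l2) = some (max qi a.2) := by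
                rw [← hax]
                exact PySem.Dict.get?_insert_self _ _ _
              rw [hg, if_pos ⟨hdc, hxlt⟩]
          · have hdc' : PySem.Set.contains done x = true := by
              cases h : PySem.Set.contains done x
              · exact absurd h hdc
              · rfl
            have hdca : PySem.Set.contains done a.1 = true := by rw [hax]; exact hdc'
            rw [if_neg (fun hc => Bool.noConfusion (hdca ▸ hc.2))]
            obtain ⟨ih1, ih2⟩ := ih done ans
            constructor
            · rw [ih1, hdc']
              simp
            · rw [ih2, if_neg (fun hc => Bool.noConfusion (hdc' ▸ hc.1)), if_neg (fun hc => Bool.noConfusion (hdc' ▸ hc.1))]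
        · have hxlt : ¬ x < l2 := fun h => hlt (by rw [hax]; exact h)
          rw [if_neg (fun hc => hlt hc.1)]
          obtain ⟨ih1, ih2⟩ := ih done ans
          have hd : decide (x < l2) = false := by simpa using hxlt
          constructor
          · rw [ih1, hd]
            simp
          · rw [ih2]
            have h1 : ¬ (PySem.Set.contains done x = false ∧ x < l2) := fun hc => hxlt hc.2
            rw [if_neg h1, if_neg h1]
      · have hfind : ((a :: t).find? (fun e => e.1 == x)) = t.find? (fun e => e.1 == x) :=
          List.find?_cons_of_neg (by simp [hax])
        rw [hfind]
        by_cases hcond : a.1 < l2 ∧ PySem.Set.contains done a.1 = false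
        · rw [if_pos hcond]
          obtain ⟨ih1, ih2⟩ := ih (PySem.Set.add done a.1) (ans.insert (a.1, l2) (max qi a.2))
          have hcx : PySem.Set.contains (PySem.Set.add done a.1) x = PySem.Set.contains done x := by
            by_cases hm : x ∈ done
            · rw [(PySem.Set.contains_iff _ _).mpr hm,
                (PySem.Set.contains_iff _ _).mpr ((PySem.Set.mem_add _ _ _).mpr (Or.inl hm))]
            · have h1 : PySem.Set.contains done x = false := by
                cases h : PySem.Set.contains done x
                · rfl
                · exact absurd ((PySem.Set.contains_iff _ _).mp h) hm
              have h2 : PySem.Set.contains (PySem.Set.add done a.1) x = false := by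
                cases h : PySem.Set.contains (PySem.Set.add done a.1) x
                · rfl
                · rcases (PySem.Set.mem_add _ _ _).mp ((PySem.Set.contains_iff _ _).mp h) with hmm | hmm
                  · exact absurd hmm hm
                  · exact absurd hmm.symm hax
              rw [h1, h2]
          have hgx : (ans.insert (a.1, l2) (max qi a.2)).get? (x, l2) = ans.get? (x, l2) :=
            PySem.Dict.get?_insert_of_ne _ _ (fun hcon => hax (congrArg Prod.fst hcon).symm)
          constructor
          · rw [ih1, hcx]
          · rw [ih2, hcx, hgx]
        · rw [if_neg hcond]
          exact ih done ans

-- every write of a sweep targets a key whose second component is l2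
lemma pv_inner_preserve (l2 : String) (qi : Int) (es : List (String × Int))
    (st : PySem.Set String × PySem.Dict (String × String) Int)
    (key : String × String) (hk : key.2 ≠ l2) :
    (es.foldl (fun st e =>
        if e.1 < l2 ∧ PySem.Set.contains st.1 e.1 = false then
          (PySem.Set.add st.1 e.1, st.2.insert (e.1, l2) (max qi e.2))
        else st) st).2.get? key = st.2.get? key := by
  induction es generalizing st with
  | nil => rfl
  | cons a t ih =>
      simp only [List.foldl_cons]
      by_cases hcond : a.1 < l2 ∧ PySem.Set.contains st.1 a.1 = false
      · rw [if_pos hcond, ih]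
        exact PySem.Dict.get?_insert_of_ne _ _ (fun hcon => hk (congrArg Prod.snd hcon))
      · rw [if_neg hcond, ih]

lemma pv_sweep_preserve (occ : PySem.Dict String (List (String × Int))) (l2 : String)
    (l : List (Int × String)) (st : PySem.Set String × PySem.Dict (String × String) Int)
    (key : String × String) (hk : key.2 ≠ l2) :
    (l.foldl (fun st q =>
        (occ.getD q.2 []).foldl (fun st e =>
          if e.1 < l2 ∧ PySem.Set.contains st.1 e.1 = false then
            (PySem.Set.add st.1 e.1, st.2.insert (e.1, l2) (max q.1 e.2))
          else st) st) st).2.get? key = st.2.get? key := by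
  induction l generalizing st with
  | nil => rfl
  | cons q t ih =>
      simp only [List.foldl_cons]
      rw [ih]
      exact pv_inner_preserve l2 q.1 _ st key hk

-- the outer sweep loop, projected to the pair (x, l2), x < l2
lemma pv_sweep_main (occ : PySem.Dict String (List (String × Int))) (l2 x : String)
    (hxl : x < l2) (l : List (Int × String))
    (done : PySem.Set String) (ans : PySem.Dict (String × String) Int) :
    (l.foldl (fun st q =>
        (occ.getD q.2 []).foldl (fun st e =>
          if e.1 < l2 ∧ PySem.Set.contains st.1 e.1 = false then
            (PySem.Set.add st.1 e.1, st.2.insert (e.1, l2) (max q.1 e.2))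
          else st) st) (done, ans)).2.get? (x, l2) =
      if PySem.Set.contains done x = true then ans.get? (x, l2)
      else
        match l.find? (fun q => ((occ.getD q.2 []).find? (fun e => e.1 == x)).isSome) with
        | some q => some (max q.1 ((((occ.getD q.2 []).find? (fun e => e.1 == x)).map (·.2)).getD 0))
        | none => ans.get? (x, l2) := by
  induction l generalizing done ans with
  | nil =>
      by_cases h : PySem.Set.contains done x = true
      · simp only [List.foldl_nil, if_pos h]
      · simp only [List.foldl_nil, List.find?_nil, if_neg h]
  | cons q t ih =>
      simp only [List.foldl_cons]
      obtain ⟨h1, h2⟩ := pv_inner_sweep l2 x q.1 (occ.getD q.2 []) done ans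
      rcases hf2 : ((occ.getD q.2 []).foldl (fun st e =>
          if e.1 < l2 ∧ PySem.Set.contains st.1 e.1 = false then
            (PySem.Set.add st.1 e.1, st.2.insert (e.1, l2) (max q.1 e.2))
          else st) (done, ans)) with ⟨done2, ans2⟩
      rw [hf2] at h1 h2
      rw [hf2]
      simp only at h1 h2
      by_cases hdc : PySem.Set.contains done x = true
      · rw [if_pos hdc]
        have hd2 : PySem.Set.contains done2 x = true := by rw [h1, hdc]; simp
        have ha2 : ans2.get? (x, l2) = ans.get? (x, l2) := by
          rw [h2, if_neg (fun hc => Bool.noConfusion (hdc ▸ hc.1))]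
        rw [ih done2 ans2, if_pos hd2, ha2]
      · have hdc' : PySem.Set.contains done x = false := by
          cases h : PySem.Set.contains done x
          · rfl
          · exact absurd h hdc
        rw [if_neg hdc]
        rcases hfind : (occ.getD q.2 []).find? (fun e => e.1 == x) with _ | e
        · have hcons : ((q :: t).find?
              (fun q => ((occ.getD q.2 []).find? (fun e => e.1 == x)).isSome)) =
              t.find? (fun q => ((occ.getD q.2 []).find? (fun e => e.1 == x)).isSome) :=
            List.find?_cons_of_neg (by simp [hfind])
          rw [hcons]
          have hd2 : PySem.Set.contains done2 x = false := by
            rw [h1, hdc', hfind]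
            simp
          have ha2 : ans2.get? (x, l2) = ans.get? (x, l2) := by
            rw [h2, if_pos ⟨hdc', hxl⟩, hfind]
          rw [ih done2 ans2, if_neg (fun hc => Bool.noConfusion (hd2 ▸ hc)), ha2]
        · have hcons : ((q :: t).find?
              (fun q => ((occ.getD q.2 []).find? (fun e => e.1 == x)).isSome)) = some q :=
            List.find?_cons_of_pos (by simp [hfind])
          rw [hcons]
          have hd2 : PySem.Set.contains done2 x = true := by
            rw [h1, hdc', hfind]
            simp [hxl]
          have ha2 : ans2.get? (x, l2) = some (max q.1 e.2) := by
            rw [h2, if_pos ⟨hdc', hxl⟩, hfind]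
          rw [ih done2 ans2, if_pos hd2, ha2]
          simp [hfind]

-- a sweep for l2 ≠ y never touches the key (x, y)
lemma pv_sweepB_preserve (occ : PySem.Dict String (List (String × Int))) (l2 : String)
    (p2 : List String) (ans : PySem.Dict (String × String) Int)
    (key : String × String) (hk : key.2 ≠ l2) :
    (pvSweepB occ l2 p2 ans).get? key = ans.get? key := by
  unfold pvSweepB
  exact pv_sweep_preserve occ l2 _ _ key hk

-- folding the remaining sweeps (none of them for y) preserves the answer for (x, y)
lemma pv_sweeps_rest (occ : PySem.Dict String (List (String × Int)))
    (P : String → List String) (x y : String) (ls : List String) (hy : y ∉ ls)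
    (ans : PySem.Dict (String × String) Int) :
    (ls.foldl (fun ans l2 => pvSweepB occ l2 (P l2) ans) ans).get? (x, y) = ans.get? (x, y) := by
  induction ls generalizing ans with
  | nil => rfl
  | cons l t ih =>
      simp only [List.foldl_cons]
      rw [ih (fun hm => hy (List.mem_cons_of_mem _ hm)),
        pv_sweepB_preserve occ l (P l) ans (x, y)
          (fun hcon => hy (by rw [show y = l from hcon]; exact List.mem_cons_self))]

-- the fold of all sweeps, projected to the pair (x, y), x < y, y a leaf
lemma pv_sweeps_get? (occ : PySem.Dict String (List (String × Int)))
    (P : String → List String) (x y : String) (hxy : x < y)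
    (ls : List String) (hnd : ls.Nodup) (hy : y ∈ ls)
    (ans : PySem.Dict (String × String) Int) :
    (ls.foldl (fun ans l2 => pvSweepB occ l2 (P l2) ans) ans).get? (x, y) =
      match (PySem.List.enumerate (P y).reverse).find?
          (fun q => ((occ.getD q.2 []).find? (fun e => e.1 == x)).isSome) with
      | some q => some (max q.1 ((((occ.getD q.2 []).find? (fun e => e.1 == x)).map (·.2)).getD 0))
      | none => ans.get? (x, y) := by
  induction ls generalizing ans with
  | nil => simp at hy
  | cons l t ih =>
      simp only [List.nodup_cons] at hnd
      simp only [List.foldl_cons]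
      by_cases hl : l = y
      · subst hl
        rw [pv_sweeps_rest occ P x l t hnd.1]
        unfold pvSweepB
        rw [pv_sweep_main occ l x hxy _ PySem.Set.empty ans,
          if_neg (by simp [PySem.Set.empty])]
      · have hy' : y ∈ t := by
          rcases List.mem_cons.mp hy with h | h
          · exact absurd h.symm hl
          · exact h
        rw [ih hnd.2 hy',
          pv_sweepB_preserve occ l (P l) ans (x, y) (fun hcon => hl hcon.symm)]

-- occ lookup for leaf x: exactly the seen-dict of x's path
lemma pv_occ_find (lgp : PySem.Dict String (List String)) (hnd : lgp.keys.Nodup)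
    (x : String) (hx : x ∈ lgp.keys) (node : String) :
    ((pvOccB lgp).getD node []).find? (fun e => e.1 == x) =
      ((pvSeenB (lgp.getD x [])).get? node).map (fun k => (x, k)) := by
  unfold pvOccB
  rw [pv_occ_getD (fun l => pvSeenB (lgp.getD l [])) lgp.keys PySem.Dict.empty node]
  rw [PySem.Dict.getD_empty]
  simp only [List.nil_append]
  have hB : ∀ l e, e ∈ ((pvSeenB (lgp.getD l [])).items.filter
      (fun e => e.1 == node)).map (fun e => (l, e.2)) → e.1 = l := by
    intro l e he
    obtain ⟨w, _, hw⟩ := List.mem_map.mp he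
    rw [← hw]
  rw [pv_find_blocks _ x hB lgp.keys hnd hx]
  rw [pv_block_eq (pvSeenB (lgp.getD x []))
    (pv_nodup_keys_setdefault _ _ _ (by simp [PySem.Dict.keys_empty])) node]
  rcases h : (pvSeenB (lgp.getD x [])).get? node with _ | k
  · simp
  · simp

-- keys of the shared lgp dict are distinct
lemma pv_lgp_nodup (pths : List (List String)) :
    (pths.foldl
      (fun d p => d.insert ((PySem.List.pyGet? p (-1)).getD "") (PySem.List.slice p none (some (-1))))
      PySem.Dict.empty).keys.Nodup := by
  apply PySem.Dict.nodup_keys_foldl_insert_key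
  simp [PySem.Dict.keys_empty]

-- per-pair value equality: A's lev = B's collected answer
lemma pv_value_eq (lgp : PySem.Dict String (List String)) (hnd : lgp.keys.Nodup)
    (x y : String) (hx : x ∈ lgp.keys) (hy : y ∈ lgp.keys) (hxy : x < y) :
    (lgp.keys.foldl (fun ans l2 => pvSweepB (pvOccB lgp) l2 (lgp.getD l2 []) ans)
        PySem.Dict.empty).get? (x, y) =
      pvLevA (lgp.getD x []) (lgp.getD y []) := by
  rw [pv_sweeps_get? (pvOccB lgp) (fun l2 => lgp.getD l2 []) x y hxy lgp.keys hnd hy]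
  rw [pvLevA, pv_scanA_eq_find?]
  have hpred : (fun q : Int × String =>
      (((pvOccB lgp).getD q.2 []).find? (fun e => e.1 == x)).isSome) =
      (fun q : Int × String =>
      ((((PySem.List.enumerate (lgp.getD x []).reverse).foldl
          (fun d q => d.insert q.2 q.1) PySem.Dict.empty)).get? q.2).isSome) := by
    funext q
    rw [pv_occ_find lgp hnd x hx q.2, pv_rA_get?, pv_seen_get?]
    simp [Option.isSome_map]
  rw [hpred]
  rcases hf : (PySem.List.enumerate (lgp.getD y []).reverse).find?
      (fun q => ((((PySem.List.enumerate (lgp.getD x []).reverse).foldl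
        (fun d q => d.insert q.2 q.1) PySem.Dict.empty)).get? q.2).isSome) with _ | q
  · simp [hf, PySem.Dict.get?_empty]
  · simp only [hf, Option.map_some]
    rw [pv_occ_find lgp hnd x hx q.2, Option.map_map]
    have h2 : ((·.2) ∘ fun k => ((x, k) : String × Int) : Int → Int) = id := rfl
    rw [h2, Option.map_id, pv_seen_get?, pv_rA_get?]
    rfl

-- the ports agree on EVERY input (outside Pre_ both take the same defaults)
lemma pv_main (pths : List (List String)) : levpairs pths = levpairs_alt pths := by
  simp only [levpairs, levpairs_alt]
  rw [pv_pairs_map _ (fun x y =>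
    pvLevA ((pths.foldl (fun d p => d.insert ((PySem.List.pyGet? p (-1)).getD "")
      (PySem.List.slice p none (some (-1)))) PySem.Dict.empty).getD x [])
      ((pths.foldl (fun d p => d.insert ((PySem.List.pyGet? p (-1)).getD "")
      (PySem.List.slice p none (some (-1)))) PySem.Dict.empty).getD y []))]
  refine List.flatMap_congr (fun x hx => ?_)
  refine List.filterMap_congr (fun y hy => ?_)
  by_cases hxy : x < y
  · rw [if_pos hxy, if_pos hxy,
      ← pv_value_eq _ (pv_lgp_nodup pths) x y hx hy hxy]
  · rw [if_neg hxy, if_neg hxy]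

-- ===== VERDICT (by name: the statement is the Claim_ definition above) =====
theorem levpairs_spec : Claim_equal_levpairs := by
  intro pths _ _
  exact pv_main pths
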